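-- pv_equiv track=rewrite | github.com/miliar/Code_Jam_Webscraper | Solutions_python/Problem_155/1004.py | calc
-- ===== SOURCE A (Python) =====
-- def calc(data):
--     standing = 0
--     invitees = 0
--     for i, n in enumerate(data):
--         while i > standing:
--             invitees += 1
--             standing += 1
--         standing += n
--     return invitees
-- ===== SOURCE B (Python) =====
-- def calc(data):
--     standing = 0
--     invitees = 0
--     for i, n in enumerate(data):
--         deficit = i - standing
--         if deficit > 0:
--             invitees += deficit
--             standing = i
--         standing += n
--     return invitees
-- ===== Notes on version B (the rewrite author's own statement) =====
-- stated objective: simpler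
-- what changed: Replaced A's inner unit-step while loop with a closed-form arithmetic deficit added in a single flat pass.
import Mathlib
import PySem

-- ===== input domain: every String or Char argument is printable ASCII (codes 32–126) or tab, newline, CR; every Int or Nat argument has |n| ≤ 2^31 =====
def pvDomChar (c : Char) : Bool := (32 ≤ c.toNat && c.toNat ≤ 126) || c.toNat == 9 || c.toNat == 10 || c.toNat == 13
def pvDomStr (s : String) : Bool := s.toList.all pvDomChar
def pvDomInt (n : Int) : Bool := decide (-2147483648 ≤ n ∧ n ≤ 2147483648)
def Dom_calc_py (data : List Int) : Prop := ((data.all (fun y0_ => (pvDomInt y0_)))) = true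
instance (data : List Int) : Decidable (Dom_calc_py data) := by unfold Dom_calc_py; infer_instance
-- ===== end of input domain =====

-- B replaces A's inner unit-step while loop by a closed-form arithmetic deficit in one flat pass (simpler).

-- ===== PORT A =====
-- the inner `while i > standing: invitees += 1; standing += 1` loop, step for step
def calcWhile (i standing invitees : Int) : Int × Int :=
  if h : standing < i then calcWhile i (standing + 1) (invitees + 1) else (standing, invitees)
termination_by (i - standing).toNat
decreasing_by omega

def calc_py (data : List Int) : Int :=
  ((PySem.List.enumerate data).foldl
    (fun (st : Int × Int) p =>
      let r := calcWhile p.1 st.1 st.2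
      (r.1 + p.2, r.2)) (0, 0)).2

-- ===== PORT B =====
def calc_py_alt (data : List Int) : Int :=
  ((PySem.List.enumerate data).foldl
    (fun (st : Int × Int) p =>
      let deficit := p.1 - st.1
      let st' := if deficit > 0 then (p.1, st.2 + deficit) else st
      (st'.1 + p.2, st'.2)) (0, 0)).2

-- ===== PRECONDITION & SPEC =====
def Spec_calc_py (data : List Int) (out : Int) : Prop := out = calc_py_alt data
instance (data : List Int) (out : Int) : Decidable (Spec_calc_py data out) := by unfold Spec_calc_py; infer_instance

-- ===== CLAIM (what is proved, stated in full; the proofs are below) =====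
def Claim_equal_calc_py : Prop := ∀ (data : List Int), Dom_calc_py data → Spec_calc_py data (calc_py data)

-- ===== LEMMAS AND PROOFS =====

theorem calcWhile_eq (i standing invitees : Int) :
    calcWhile i standing invitees =
      (if standing < i then (i, invitees + (i - standing)) else (standing, invitees)) := by
  fun_induction calcWhile i standing invitees with
  | case1 s v h ih =>
      rw [ih]
      split_ifs <;> simp_all <;> omega
  | case2 s v h =>
      simp [h]

theorem step_eq :
    (fun (st : Int × Int) (p : Int × Int) =>
      let r := calcWhile p.1 st.1 st.2
      (r.1 + p.2, r.2)) =
    (fun (st : Int × Int) (p : Int × Int) =>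
      let deficit := p.1 - st.1
      let st' := if deficit > 0 then (p.1, st.2 + deficit) else st
      (st'.1 + p.2, st'.2)) := by
  funext st p
  simp only [calcWhile_eq]
  split_ifs <;> simp_all <;> omega

-- ===== VERDICT (by name: the statement is the Claim_ definition above) =====
theorem calc_py_spec : Claim_equal_calc_py := by
  intro data _
  unfold Spec_calc_py calc_py calc_py_alt
  rw [step_eq]
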